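-- pv_equiv track=rewrite | github.com/chIorophyII/PythonAlgorithmStudy | Week5/Q4/알알못.py | solution
-- ===== SOURCE A (Python) =====
-- def solution(a):
--     result = [False for _ in range(len(a))]
--     minFront, minRear = float("inf"), float("inf")
--     for i in range(len(a)):
--         if a[i] < minFront:
--             minFront = a[i]
--             result[i] = True
--         if a[-1-i] < minRear:
--             minRear = a[-1-i]
--             result[-1-i] = True
--     return sum(result)
-- ===== SOURCE B (Python) =====
-- def _strict_count(it):
--     c = 0
--     m = None
--     for x in it:
--         if m is None or x < m:
--             m = x
--             c += 1
--     return c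
--
--
-- def solution(a):
--     if not a:
--         return 0
--     overlap = 1 if a.count(min(a)) == 1 else 0
--     return _strict_count(a) + _strict_count(reversed(a)) - overlap
-- ===== Notes on version B (the rewrite author's own statement) =====
-- stated objective: alternative
-- what changed: B never builds or marks a per-index array: it counts strict running minima in a forward pass and a backward pass independently and subtracts the overlap, derived arithmetically as 1 exactly when the global minimum occurs once (a position is both a prefix- and suffix-minimum iff it is the unique global minimum).
import Mathlib
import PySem

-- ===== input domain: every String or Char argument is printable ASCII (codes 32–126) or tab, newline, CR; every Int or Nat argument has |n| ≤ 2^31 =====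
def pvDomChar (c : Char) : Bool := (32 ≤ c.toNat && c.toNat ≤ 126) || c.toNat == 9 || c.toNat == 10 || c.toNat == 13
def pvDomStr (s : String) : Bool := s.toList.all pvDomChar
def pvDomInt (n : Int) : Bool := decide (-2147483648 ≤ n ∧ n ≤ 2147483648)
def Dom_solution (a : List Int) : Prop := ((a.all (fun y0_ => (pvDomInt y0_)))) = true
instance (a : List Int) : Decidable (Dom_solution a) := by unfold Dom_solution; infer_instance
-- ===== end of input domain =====

-- B drops A's per-index boolean marking array entirely: it counts strict running minima in a
-- forward and a backward pass and subtracts the overlap, computed arithmetically as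
-- 1 iff the global minimum occurs exactly once; same O(n) cost, return values proved equal.

-- ===== PORT A =====
-- float("inf") is modelled by `none : Option Int`: every Int is < inf, which is exactly `ltInfA`.
def ltInfA (x : Int) (m : Option Int) : Bool :=
  match m with
  | none => true
  | some v => x < v

-- one iteration of A's for-loop; i and n-1-i are in range (i < n = a.length), so getD is exact,
-- and Python's result[-1-i] is the set at position n-1-i.
def solutionStep (a : List Int) (n : Nat)
    (st : List Bool × Option Int × Option Int) (i : Nat) :
    List Bool × Option Int × Option Int :=
  let res := st.1
  let mf := st.2.1
  let mr := st.2.2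
  let x := a.getD i 0
  let res1 := if ltInfA x mf then res.set i true else res
  let mf1 := if ltInfA x mf then some x else mf
  let y := a.getD (n - 1 - i) 0
  let res2 := if ltInfA y mr then res1.set (n - 1 - i) true else res1
  let mr1 := if ltInfA y mr then some y else mr
  (res2, mf1, mr1)

def solution (a : List Int) : Int :=
  let n := a.length
  let st := (List.range n).foldl (solutionStep a n) (List.replicate n false, none, none)
  -- Python's sum over a list of booleans = number of True entries
  ((st.1.count true : Nat) : Int)

-- ===== PORT B =====
-- the loop of _strict_count; `None` (no element seen yet) is `none : Option Int`
def strictCount (l : List Int) (c : Int) (m : Option Int) : Int :=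
  match l with
  | [] => c
  | x :: t =>
    if (match m with | none => true | some v => decide (x < v)) then strictCount t (c + 1) (some x)
    else strictCount t c m

def solution_alt (a : List Int) : Int :=
  if a = [] then 0
  else
    -- min(a) (a is non-empty here) and a.count(min(a))
    let mv := (PySem.List.min? a (fun y => y)).getD 0
    let overlap : Int := if PySem.List.count a mv = 1 then 1 else 0
    strictCount a 0 none + strictCount a.reverse 0 none - overlap

-- ===== PRECONDITION & SPEC =====
def Spec_solution (a : List Int) (out : Int) : Prop := out = solution_alt a
instance (a : List Int) (out : Int) : Decidable (Spec_solution a out) := by unfold Spec_solution; infer_instance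

-- ===== CLAIM (what is proved, stated in full; the proofs are below) =====
def Claim_equal_solution : Prop := ∀ (a : List Int), Dom_solution a → Spec_solution a (solution a)

-- ===== LEMMAS AND PROOFS =====

-- proof-only helpers: minimum with +inf as `none`
def pmin (m : Option Int) (x : Int) : Option Int :=
  some (match m with | none => x | some v => min v x)

def minInf (l : List Int) : Option Int := l.foldl pmin none

-- front/rear marking conditions (per-index form of A's two running-minimum tests)
def fMark (a : List Int) (j : Nat) : Bool := ltInfA (a.getD j 0) (minInf (a.take j))
def rMark (a : List Int) (j : Nat) : Bool := ltInfA (a.getD j 0) (minInf (a.drop (j + 1)))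

lemma pmin_comm (m : Option Int) (x y : Int) : pmin (pmin m x) y = pmin (pmin m y) x := by
  cases m <;> simp [pmin, min_comm, min_left_comm]

lemma foldl_pmin_swap (l : List Int) (m : Option Int) (x : Int) :
    l.foldl pmin (pmin m x) = pmin (l.foldl pmin m) x := by
  induction l generalizing m with
  | nil => rfl
  | cons y t ih =>
    rw [List.foldl_cons, List.foldl_cons, pmin_comm]
    exact ih (pmin m y)

lemma minInf_cons (x : Int) (l : List Int) : minInf (x :: l) = pmin (minInf l) x := by
  have h := foldl_pmin_swap l none x
  simpa [minInf] using h

lemma minInf_concat (l : List Int) (x : Int) : minInf (l ++ [x]) = pmin (minInf l) x := by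
  simp [minInf, List.foldl_append]

lemma set_map_range {n i : Nat} (f : Nat → Bool) (b : Bool) (_ : i < n) :
    ((List.range n).map f).set i b
      = (List.range n).map (fun j => if j = i then b else f j) := by
  apply List.ext_getElem
  · simp
  · intro k h1 h2
    simp only [List.getElem_set, List.getElem_map, List.getElem_range]
    rcases eq_or_ne i k with h | h
    · subst h; simp
    · simp [h, Ne.symm h]

lemma mf_update (a : List Int) (k : Nat) (hk : k < a.length) :
    minInf (a.take (k + 1))
      = (if ltInfA (a.getD k 0) (minInf (a.take k)) then some (a.getD k 0)
         else minInf (a.take k)) := by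
  have ht : a.take (k + 1) = a.take k ++ [a[k]] := by
    rw [List.take_add_one]
    simp [List.getElem?_eq_getElem hk]
  rw [ht, minInf_concat, List.getD_eq_getElem?_getD, List.getElem?_eq_getElem hk]
  cases hm : minInf (a.take k) with
  | none => simp [pmin, ltInfA]
  | some v =>
    by_cases h : a[k] < v
    · simp [pmin, ltInfA, h, le_of_lt h]
    · have hv : min v a[k] = v := min_eq_left (le_of_not_gt h)
      simp [pmin, ltInfA, h, hv]

lemma mr_update (a : List Int) (k : Nat) (hk : k < a.length) :
    minInf (a.drop (a.length - (k + 1)))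
      = (if ltInfA (a.getD (a.length - 1 - k) 0) (minInf (a.drop (a.length - k)))
           then some (a.getD (a.length - 1 - k) 0)
         else minInf (a.drop (a.length - k))) := by
  have hidx : a.length - 1 - k < a.length := by omega
  have h1 : a.length - (k + 1) = a.length - 1 - k := by omega
  have h2 : a.length - 1 - k + 1 = a.length - k := by omega
  have hd : a.drop (a.length - 1 - k) = a[a.length - 1 - k] :: a.drop (a.length - k) := by
    rw [← h2]
    exact List.drop_eq_getElem_cons hidx
  rw [h1, hd, minInf_cons, List.getD_eq_getElem?_getD, List.getElem?_eq_getElem hidx]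
  cases hm : minInf (a.drop (a.length - k)) with
  | none => simp [pmin, ltInfA]
  | some v =>
    by_cases h : a[a.length - 1 - k] < v
    · simp [pmin, ltInfA, h, le_of_lt h]
    · have hv : min v a[a.length - 1 - k] = v := min_eq_left (le_of_not_gt h)
      simp [pmin, ltInfA, h, hv]

-- the effect of one iteration on the marking list
lemma result_step (n k : Nat) (F R : Nat → Bool) (hk : k < n)
    (L1 L2 : List Bool)
    (h1 : L1 = if F k
        then ((List.range n).map (fun j => (decide (j < k) && F j) || (decide (n - k ≤ j) && R j))).set k true
        else (List.range n).map (fun j => (decide (j < k) && F j) || (decide (n - k ≤ j) && R j)))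
    (h2 : L2 = if R (n - 1 - k) then L1.set (n - 1 - k) true else L1) :
    L2 = (List.range n).map
        (fun j => (decide (j < k + 1) && F j) || (decide (n - (k + 1) ≤ j) && R j)) := by
  have hk2 : n - 1 - k < n := by omega
  subst h1 h2
  by_cases hf : F k <;> by_cases hr : R (n - 1 - k) <;>
    simp only [hf, hr, Bool.false_eq_true, ite_true, ite_false] <;>
    (try rw [set_map_range _ _ hk]) <;>
    (try rw [set_map_range _ _ hk2]) <;>
    · apply List.map_congr_left
      intro j hj
      have hjn : j < n := List.mem_range.mp hj
      rcases eq_or_ne j k with e1 | e1 <;> rcases eq_or_ne j (n - 1 - k) with e2 | e2 <;>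
        (try simp_all only [if_pos, if_neg, ite_true, ite_false, ne_eq, not_false_iff]) <;>
        (try simp only [Bool.and_true, Bool.and_false, Bool.or_false, Bool.false_or]) <;>
        first
        | rfl
        | (symm; simp only [decide_eq_true_eq]; omega)
        | (symm
           simp only [Bool.or_eq_true, Bool.and_eq_true, decide_eq_true_eq]
           first
           | (left; constructor <;> first | omega | rfl)
           | (left; omega)
           | (right; constructor <;> first | omega | rfl)
           | (right; omega))
        | (congr 1 <;>
            first
            | rfl
            | exact decide_eq_decide.mpr (by omega)
            | (congr 1 <;> first | rfl | exact decide_eq_decide.mpr (by omega)))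

-- loop invariant: after k iterations the marks are the first-k front hits and last-k rear hits,
-- and the two minima are the minima of the processed prefix / suffix
lemma loop_inv (a : List Int) (k : Nat) (hk : k ≤ a.length) :
    (List.range k).foldl (solutionStep a a.length) (List.replicate a.length false, none, none)
      = ((List.range a.length).map
           (fun j => (decide (j < k) && fMark a j) || (decide (a.length - k ≤ j) && rMark a j)),
         minInf (a.take k), minInf (a.drop (a.length - k))) := by
  induction k with
  | zero =>
    refine Prod.ext ?_ (Prod.ext ?_ ?_)
    · apply List.ext_getElem
      · simp
      · intro j h1 h2
        simp only [List.getElem_map, List.getElem_range]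
        have hj : j < a.length := by simpa using h1
        have h0 : ¬ (j < 0) := by omega
        have hb : ¬ (a.length - 0 ≤ j) := by omega
        have hc : ¬ (a.length ≤ j) := by omega
        simp [h0, hb, hc]
    · simp [minInf]
    · simp [minInf]
  | succ k ih =>
    have hk' : k < a.length := hk
    have ihk := ih (Nat.le_of_lt hk')
    rw [List.range_succ, List.foldl_append, List.foldl_cons, List.foldl_nil, ihk]
    have hR' : ltInfA (a.getD (a.length - 1 - k) 0) (minInf (a.drop (a.length - k)))
        = rMark a (a.length - 1 - k) := by
      have h2 : a.length - 1 - k + 1 = a.length - k := by omega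
      rw [rMark, h2]
    simp only [solutionStep]
    refine Prod.ext ?_ (Prod.ext ?_ ?_)
    · refine result_step a.length k (fMark a) (rMark a) hk' _ _ rfl ?_
      rw [hR', show ltInfA (a.getD k 0) (minInf (a.take k)) = fMark a k from rfl]
      all_goals exact rfl
    · rw [mf_update a k hk']
    · rw [mr_update a k hk', hR']

-- ===== B-side lemmas =====

-- Nat-valued specification of _strict_count's loop
def mcount (l : List Int) (m : Option Int) : Nat :=
  match l with
  | [] => 0
  | x :: t => (if ltInfA x m then 1 else 0) + mcount t (pmin m x)

lemma pmin_of_lt (m : Option Int) (x : Int) (h : ltInfA x m = true) : pmin m x = some x := by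
  cases m with
  | none => rfl
  | some v =>
    simp only [ltInfA, decide_eq_true_eq] at h
    simp [pmin, min_eq_right h.le]

-- the inline test in strictCount is exactly ltInfA
lemma strictCount_test_eq (x : Int) (m : Option Int) :
    (match m with | none => true | some v => decide (x < v)) = ltInfA x m := by
  cases m <;> rfl

lemma strictCount_eq (l : List Int) (c : Int) (m : Option Int) :
    strictCount l c m = c + (mcount l m : Int) := by
  induction l generalizing c m with
  | nil => simp [strictCount, mcount]
  | cons x t ih =>
    by_cases h : ltInfA x m
    · simp only [strictCount, mcount, strictCount_test_eq, h, if_true]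
      rw [ih, pmin_of_lt m x h]
      push_cast; ring
    · have hp : pmin m x = m := by
        cases m with
        | none => simp [ltInfA] at h
        | some v =>
          simp only [ltInfA, decide_eq_true_eq] at h
          simp [pmin, min_eq_left (le_of_not_gt h)]
      simpa [strictCount, mcount, strictCount_test_eq, h, hp] using ih c m

lemma countP_prefix_marks (l : List Int) (m : Option Int) :
    (List.range l.length).countP
        (fun j => ltInfA (l.getD j 0) ((l.take j).foldl pmin m)) = mcount l m := by
  induction l generalizing m with
  | nil => simp [mcount]
  | cons x t ih =>
    rw [List.length_cons, List.range_succ_eq_map, List.countP_cons, List.countP_map]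
    have ht : ((fun j => ltInfA ((x :: t).getD j 0) (((x :: t).take j).foldl pmin m)) ∘ Nat.succ)
        = fun j => ltInfA (t.getD j 0) ((t.take j).foldl pmin (pmin m x)) := by
      funext j
      simp [Function.comp, List.getD_cons_succ, List.take_succ_cons]
    rw [ht, ih (pmin m x)]
    simp [mcount, List.getD_cons_zero, Nat.add_comm]

lemma countP_fMark (a : List Int) :
    (List.range a.length).countP (fMark a) = mcount a none := by
  rw [← countP_prefix_marks a none]
  rfl

lemma minInf_reverse (l : List Int) : minInf l.reverse = minInf l := by
  induction l with
  | nil => rfl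
  | cons x t ih => rw [List.reverse_cons, minInf_concat, ih, minInf_cons]

lemma rMark_eq_fMark_reverse (a : List Int) (j : Nat) (hj : j < a.length) :
    rMark a j = fMark a.reverse (a.length - 1 - j) := by
  have hidx : a.length - 1 - j < a.length := by omega
  have hg : a.reverse.getD (a.length - 1 - j) 0 = a.getD j 0 := by
    have hi2 : a.length - 1 - (a.length - 1 - j) = j := by omega
    rw [List.getD_eq_getElem?_getD, List.getD_eq_getElem?_getD,
      List.getElem?_eq_getElem (by simpa using hidx),
      List.getElem?_eq_getElem hj]
    simp only [List.getElem_reverse, hi2]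
  have htake : a.reverse.take (a.length - 1 - j) = (a.drop (j + 1)).reverse := by
    have hi3 : a.length - (a.length - 1 - j) = j + 1 := by omega
    rw [List.take_reverse, hi3]
  rw [fMark, rMark, hg, htake, minInf_reverse]

lemma countP_range_rev (p : Nat → Bool) (n : Nat) :
    (List.range n).countP (fun j => p (n - 1 - j)) = (List.range n).countP p := by
  have hmap : (List.range n).map (fun j => n - 1 - j) = (List.range n).reverse := by
    apply List.ext_getElem
    · simp
    · intro i h1 h2
      simp only [List.getElem_map, List.getElem_range, List.getElem_reverse, List.length_range]
  rw [show (fun j => p (n - 1 - j)) = (p ∘ fun j => n - 1 - j) from rfl, ← List.countP_map, hmap]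
  exact (List.reverse_perm (List.range n)).countP_eq p

lemma countP_rMark (a : List Int) :
    (List.range a.length).countP (rMark a) = mcount a.reverse none := by
  have h1 : (List.range a.length).countP (rMark a)
      = (List.range a.length).countP (fun j => fMark a.reverse (a.length - 1 - j)) := by
    apply List.countP_congr
    intro j hj
    rw [rMark_eq_fMark_reverse a j (List.mem_range.mp hj)]
  rw [h1, countP_range_rev (fMark a.reverse) a.length]
  have := countP_fMark a.reverse
  rwa [List.length_reverse] at this

lemma countP_or_and {α : Type} (p q : α → Bool) (l : List α) :
    l.countP (fun x => p x || q x) + l.countP (fun x => p x && q x)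
      = l.countP p + l.countP q := by
  induction l with
  | nil => rfl
  | cons x t ih =>
    simp only [List.countP_cons]
    by_cases hp : p x <;> by_cases hq : q x <;> simp [hp, hq] <;> omega

lemma ltInfA_pmin (x y : Int) (m : Option Int) :
    ltInfA x (pmin m y) = (ltInfA x m && decide (x < y)) := by
  cases m <;> simp [ltInfA, pmin, lt_min_iff]

lemma ltInfA_minInf (x : Int) (l : List Int) :
    ltInfA x (minInf l) = l.all (fun y => decide (x < y)) := by
  induction l with
  | nil => rfl
  | cons y t ih =>
    rw [minInf_cons, ltInfA_pmin, ih, List.all_cons, Bool.and_comm]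

lemma foldl_pmin_some (t : List Int) (v : Int) :
    t.foldl pmin (some v) = some (t.foldl min v) := by
  induction t generalizing v with
  | nil => rfl
  | cons y s ih => simp [pmin, ih]

lemma minInf_eq_min? (a : List Int) (h : a ≠ []) :
    minInf a = PySem.List.min? a (fun y => y) := by
  cases a with
  | nil => exact absurd rfl h
  | cons x t =>
    rw [PySem.List.min?_id_cons, minInf, List.foldl_cons]
    exact foldl_pmin_some t x

-- the pointwise characterisation: position j carries both marks iff a[j] is the unique minimum
lemma both_marks_iff (a : List Int) (mv : Int) (hmv : minInf a = some mv)
    (hmem : mv ∈ a) (hmin : ∀ y ∈ a, mv ≤ y) (j : Nat) (hj : j < a.length) :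
    (fMark a j && rMark a j) = (decide (a.getD j 0 = mv) && decide (a.count mv = 1)) := by
  have hsplit : a = a.take j ++ a[j] :: a.drop (j + 1) := by
    conv_lhs => rw [← List.take_append_drop j a]
    rw [List.drop_eq_getElem_cons hj]
  have hget : a.getD j 0 = a[j] := by
    rw [List.getD_eq_getElem?_getD, List.getElem?_eq_getElem hj]; rfl
  rw [fMark, rMark, hget, ltInfA_minInf, ltInfA_minInf]
  by_cases hb : (∀ y ∈ a.take j, a[j] < y) ∧ (∀ y ∈ a.drop (j + 1), a[j] < y)
  · -- both marks hold: a[j] = mv and mv occurs once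
    have hle : mv ≤ a[j] := hmin _ (List.getElem_mem hj)
    have hmem3 : mv ∈ a.take j ∨ mv = a[j] ∨ mv ∈ a.drop (j + 1) := by
      have h2 : mv ∈ a.take j ++ a[j] :: a.drop (j + 1) := by rw [← hsplit]; exact hmem
      rw [List.mem_append, List.mem_cons] at h2
      tauto
    have heq : a[j] = mv := by
      rcases hmem3 with h | h | h
      · exact absurd (hb.1 _ h) (by omega)
      · omega
      · exact absurd (hb.2 _ h) (by omega)
    have hc1 : (a.take j).count mv = 0 := by
      rw [List.count_eq_zero]
      intro h
      exact absurd (hb.1 _ h) (by omega)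
    have hc2 : (a.drop (j + 1)).count mv = 0 := by
      rw [List.count_eq_zero]
      intro h
      exact absurd (hb.2 _ h) (by omega)
    have hcount : a.count mv = 1 := by
      conv_lhs => rw [hsplit]
      rw [List.count_append, List.count_cons, hc1, hc2, heq]
      simp
    have h1 : ((a.take j).all fun y => decide (a[j] < y)) = true := by
      simp only [List.all_eq_true, decide_eq_true_eq]
      exact hb.1
    have h2 : ((a.drop (j + 1)).all fun y => decide (a[j] < y)) = true := by
      simp only [List.all_eq_true, decide_eq_true_eq]
      exact hb.2
    rw [h1, h2, heq]
    simp [hcount]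
  · -- some mark fails: a[j] is not the unique minimum
    have hne : ¬ (a[j] = mv ∧ a.count mv = 1) := by
      rintro ⟨heq, hcount⟩
      rw [hsplit, List.count_append, List.count_cons, heq] at hcount
      simp only [BEq.rfl, if_true] at hcount
      apply hb
      constructor
      · intro y hy
        have hle : mv ≤ y := hmin y (by rw [hsplit]; exact List.mem_append_left _ hy)
        rcases lt_or_eq_of_le hle with hlt | he
        · omega
        · exfalso
          have hmem2 : mv ∈ a.take j := by rw [he]; exact hy
          have := List.count_pos_iff.mpr hmem2
          omega
      · intro y hy
        have hle : mv ≤ y := hmin y (by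
          rw [hsplit]; exact List.mem_append_right _ (List.mem_cons_of_mem _ hy))
        rcases lt_or_eq_of_le hle with hlt | he
        · omega
        · exfalso
          have hmem2 : mv ∈ a.drop (j + 1) := by rw [he]; exact hy
          have := List.count_pos_iff.mpr hmem2
          omega
    have hRfalse : (decide (a[j] = mv) && decide (a.count mv = 1)) = false := by
      rcases not_and_or.mp hne with h | h <;> simp [h]
    rw [hRfalse]
    rcases not_and_or.mp hb with h | h
    · have hf : ((a.take j).all fun y => decide (a[j] < y)) = false := by
        rw [← Bool.not_eq_true, List.all_eq_true]
        simpa using h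
      simp [hf]
    · have hf : ((a.drop (j + 1)).all fun y => decide (a[j] < y)) = false := by
        rw [← Bool.not_eq_true, List.all_eq_true]
        simpa using h
      simp [hf]

lemma count_eq_countP_range (l : List Int) (v : Int) :
    (List.range l.length).countP (fun j => decide (l.getD j 0 = v)) = l.count v := by
  induction l with
  | nil => rfl
  | cons x t ih =>
    rw [List.length_cons, List.range_succ_eq_map, List.countP_cons, List.countP_map]
    have ht : ((fun j => decide ((x :: t).getD j 0 = v)) ∘ Nat.succ)
        = fun j => decide (t.getD j 0 = v) := by
      funext j
      simp [Function.comp]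
    rw [ht, ih, List.count_cons]
    simp [List.getD_cons_zero, beq_iff_eq, Nat.add_comm]

lemma countP_both (a : List Int) (h : a ≠ []) :
    ((List.range a.length).countP (fun j => fMark a j && rMark a j) : Int)
      = (if PySem.List.count a ((PySem.List.min? a (fun y => y)).getD 0) = 1 then 1 else 0) := by
  obtain ⟨mv, hmv⟩ : ∃ mv, PySem.List.min? a (fun y => y) = some mv := by
    cases hm : PySem.List.min? a (fun y => y) with
    | none => exact absurd ((PySem.List.min?_eq_none_iff a (fun y => y)).mp hm) h
    | some v => exact ⟨v, rfl⟩
  have hmem : mv ∈ a := PySem.List.min?_mem hmv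
  have hmin : ∀ y ∈ a, mv ≤ y := PySem.List.min?_isMin hmv
  have hInf : minInf a = some mv := by rw [minInf_eq_min? a h, hmv]
  have hcnt : PySem.List.count a mv = a.count mv := PySem.List.count_eq a mv
  rw [hmv]
  simp only [Option.getD_some, hcnt]
  have hpt : (List.range a.length).countP (fun j => fMark a j && rMark a j)
      = (List.range a.length).countP
          (fun j => decide (a.getD j 0 = mv) && decide (a.count mv = 1)) := by
    apply List.countP_congr
    intro j hj
    rw [both_marks_iff a mv hInf hmem hmin j (List.mem_range.mp hj)]
  rw [hpt]
  by_cases hc : a.count mv = 1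
  · have : (List.range a.length).countP
        (fun j => decide (a.getD j 0 = mv) && decide (a.count mv = 1))
        = (List.range a.length).countP (fun j => decide (a.getD j 0 = mv)) := by
      apply List.countP_congr
      intro j _
      simp [hc]
    rw [this, count_eq_countP_range, hc]
    simp [hc]
  · have : (List.range a.length).countP
        (fun j => decide (a.getD j 0 = mv) && decide (a.count mv = 1)) = 0 := by
      rw [List.countP_eq_zero]
      intro j _
      simp [hc]
    rw [this]
    simp [hc]

-- A's result as a countP over indices
lemma solution_eq_countP (a : List Int) :
    solution a = ((List.range a.length).countP (fun j => fMark a j || rMark a j) : Int) := by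
  simp only [solution]
  rw [loop_inv a a.length (le_refl _)]
  congr 1
  simp only [List.count, List.countP_map]
  apply List.countP_congr
  intro j hj
  have hjn : j < a.length := List.mem_range.mp hj
  have h1 : decide (j < a.length) = true := by simpa using hjn
  have h2 : decide (a.length - a.length ≤ j) = true := by simp
  simp [Function.comp, h1, h2]

-- ===== VERDICT (by name: the statement is the Claim_ definition above) =====
theorem solution_spec : Claim_equal_solution := by
  intro a _
  show solution a = solution_alt a
  by_cases h : a = []
  · subst h; rfl
  · rw [solution_eq_countP]
    simp only [solution_alt, h, if_false]
    rw [strictCount_eq a 0 none, strictCount_eq a.reverse 0 none]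
    have hie := countP_or_and (fMark a) (rMark a) (List.range a.length)
    rw [countP_fMark a, countP_rMark a] at hie
    have hboth := countP_both a h
    have hor : ((List.range a.length).countP (fun j => fMark a j || rMark a j) : Int)
        + ((List.range a.length).countP (fun j => fMark a j && rMark a j) : Int)
        = (mcount a none : Int) + (mcount a.reverse none : Int) := by
      exact_mod_cast congrArg (Nat.cast : Nat → Int) hie
    omega
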